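-- pv_equiv track=rewrite | github.com/matija-speletic/elfak-svasta | vi/Vestacka Lab 1/LAB1.py | uredi
-- ===== SOURCE A (Python) =====
-- def uredi(l, num, val):
--     res = []
--     for i in range(len(l)):
--         if i < num:
--             res.append(l[i]+val)
--         else:
--             res.append(l[i]-val)
--     return res
-- ===== SOURCE B (Python) =====
-- def uredi(l, num, val):
--     res = [x - val for x in l]
--     for i in range(min(max(num, 0), len(l))):
--         res[i] += 2 * val
--     return res
-- ===== Notes on version B (the rewrite author's own statement) =====
-- stated objective: alternative
-- what changed: Instead of branching on the index in one pass, B first subtracts val from every element uniformly, then does a second in-place correction loop adding 2*val to the clamped prefix res[0:min(max(num,0),len(l))].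
import Mathlib
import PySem

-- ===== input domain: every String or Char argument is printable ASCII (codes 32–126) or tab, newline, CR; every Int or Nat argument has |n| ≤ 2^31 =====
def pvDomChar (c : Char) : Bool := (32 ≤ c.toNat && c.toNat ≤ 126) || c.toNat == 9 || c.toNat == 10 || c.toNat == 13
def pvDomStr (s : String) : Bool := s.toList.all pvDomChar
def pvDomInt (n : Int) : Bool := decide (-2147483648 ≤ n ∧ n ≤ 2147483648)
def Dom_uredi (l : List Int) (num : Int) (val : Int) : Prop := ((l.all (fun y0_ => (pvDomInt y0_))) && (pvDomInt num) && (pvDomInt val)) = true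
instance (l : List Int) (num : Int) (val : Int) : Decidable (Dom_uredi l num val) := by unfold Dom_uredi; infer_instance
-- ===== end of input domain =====

-- B replaces A's per-index branching pass by a uniform subtract-val map followed by an in-place +2*val correction of the clamped prefix: an alternative decomposition, same cost.


-- ===== PORT A =====
-- for i in range(len(l)): append l[i]+val or l[i]-val depending on i < num
-- (l[i] with i drawn from range(len(l)) is always in range, so pyGetD's default is never used)
def uredi (l : List Int) (num : Int) (val : Int) : List Int :=
  (PySem.List.pyRange 0 (l.length : Int) 1).foldl
    (fun res i =>
      if i < num then res ++ [PySem.List.pyGetD l i 0 + val]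
      else res ++ [PySem.List.pyGetD l i 0 - val]) []

-- ===== PORT B =====
-- res = [x - val for x in l]; for i in range(min(max(num,0),len(l))): res[i] += 2*val
-- (i is always in range of res, so pySetD/pyGetD are exact here)
def uredi_alt (l : List Int) (num : Int) (val : Int) : List Int :=
  (PySem.List.pyRange 0 (min (max num 0) (l.length : Int)) 1).foldl
    (fun res i => PySem.List.pySetD res i (PySem.List.pyGetD res i 0 + 2 * val))
    (l.map (fun x => x - val))

-- ===== PRECONDITION & SPEC =====
def Spec_uredi (l : List Int) (num : Int) (val : Int) (out : List Int) : Prop := out = uredi_alt l num val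
instance (l : List Int) (num : Int) (val : Int) (out : List Int) : Decidable (Spec_uredi l num val out) := by unfold Spec_uredi; infer_instance

-- ===== CLAIM (what is proved, stated in full; the proofs are below) =====
def Claim_equal_uredi : Prop := ∀ (l : List Int) (num : Int) (val : Int), Dom_uredi l num val → Spec_uredi l num val (uredi l num val)

-- ===== LEMMAS AND PROOFS =====

-- A's branching pass, split at the clamp point
theorem uredi_split (l : List Int) (num : Int) (val : Int) (n : Nat)
    (hn : (max 0 num).toNat = n) :
    (List.range l.length).map
      (fun (k : Nat) => if (k : Int) < num then l.getD k 0 + val else l.getD k 0 - val)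
    = (l.take n).map (fun x => x + val) ++ (l.drop n).map (fun x => x - val) := by
  induction l generalizing num n with
  | nil => simp
  | cons x xs ih =>
    rw [List.length_cons, List.range_succ_eq_map]
    have htail : (List.range xs.length).map
        ((fun (k : Nat) => if (k : Int) < num then (x :: xs).getD k 0 + val
                           else (x :: xs).getD k 0 - val) ∘ Nat.succ)
        = (List.range xs.length).map
          (fun (k : Nat) => if (k : Int) < num - 1 then xs.getD k 0 + val
                            else xs.getD k 0 - val) := by
      apply List.map_congr_left; intro k _
      have hiff : ((k : Int) + 1 < num) ↔ ((k : Int) < num - 1) := by omega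
      simp [Function.comp_apply, Nat.succ_eq_add_one, hiff]
    cases n with
    | zero =>
      have h0 : ¬ ((0 : Int) < num) := by omega
      have hn' : (max 0 (num - 1)).toNat = 0 := by omega
      simp only [List.map_cons, List.map_map]
      rw [htail, ih (num - 1) 0 hn']
      simp [h0]
    | succ m =>
      have h0 : ((0 : Int) < num) := by omega
      have hn' : (max 0 (num - 1)).toNat = m := by omega
      simp only [List.map_cons, List.map_map]
      rw [htail, ih (num - 1) m hn']
      simp [h0]

-- the patch loop adds c to each of the first n elements
theorem patch_loop (c : Int) (n : Nat) (res : List Int) (hn : n ≤ res.length) :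
    (List.range n).foldl (fun r k => r.set k (r.getD k 0 + c)) res
    = (res.take n).map (fun x => x + c) ++ res.drop n := by
  induction n with
  | zero => simp
  | succ m ih =>
    have hm : m ≤ res.length := by omega
    have hmlt : m < res.length := by omega
    rw [List.range_succ, List.foldl_append, ih hm]
    have hlen : ((res.take m).map (fun x => x + c)).length = m := by
      simp [List.length_take, Nat.min_eq_left hm]
    have hdrop : res.drop m = res[m] :: res.drop (m+1) := List.drop_eq_getElem_cons hmlt
    simp only [List.foldl_cons, List.foldl_nil]
    rw [hdrop]
    have hget : (((res.take m).map (fun x => x + c)) ++ res[m] :: res.drop (m+1)).getD m 0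
        = res[m] := by
      rw [List.getD_eq_getElem?_getD, List.getElem?_append_right (le_of_eq hlen), hlen]
      simp [List.getElem?_eq_getElem hmlt]
    rw [hget, List.set_append_right _ _ (le_of_eq hlen), hlen, Nat.sub_self,
        List.set_cons_zero]
    have htk1 : List.take (m+1) (List.map (fun x => x + c) res)
        = List.take m (List.map (fun x => x + c) res) ++ [res[m] + c] := by
      rw [List.take_add_one]
      have hme : (List.map (fun x => x + c) res)[m]? = some (res[m] + c) := by
        simp [List.getElem?_eq_getElem hmlt]
      rw [hme]; rfl
    simp only [List.map_take]
    rw [htk1]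
    simp

-- ===== VERDICT (by name: the statement is the Claim_ definition above) =====
theorem uredi_spec : Claim_equal_uredi := by
  intro l num val _
  unfold Spec_uredi uredi uredi_alt
  -- A side: rewrite to a map over List.range, then split
  have hfun : (fun (res : List Int) (i : Int) =>
      if i < num then res ++ [PySem.List.pyGetD l i 0 + val]
      else res ++ [PySem.List.pyGetD l i 0 - val])
      = (fun res i => res ++ [if i < num then PySem.List.pyGetD l i 0 + val
                              else PySem.List.pyGetD l i 0 - val]) := by
    funext res i; split <;> rfl
  rw [hfun, PySem.List.foldl_append_singleton_eq_map]
  have hr : PySem.List.pyRange 0 ((l.length : Nat) : Int) 1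
      = (List.range l.length).map (fun (k : Nat) => (k : Int)) := by
    rw [PySem.List.pyRange_one]; simp
  rw [hr, List.map_map]
  have hA : (List.range l.length).map
      ((fun i => if i < num then PySem.List.pyGetD l i 0 + val else PySem.List.pyGetD l i 0 - val)
        ∘ (fun (k : Nat) => (k : Int)))
      = (List.range l.length).map
        (fun (k : Nat) => if (k : Int) < num then l.getD k 0 + val else l.getD k 0 - val) := by
    apply List.map_congr_left; intro k hk
    simp [Function.comp_apply, PySem.List.pyGetD_natCast]
  rw [hA]
  -- B side
  have h0b : (0 : Int) ≤ min (max num 0) (l.length : Int) := by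
    have : (0 : Int) ≤ (l.length : Int) := Int.natCast_nonneg _
    omega
  have hbN : min (max num 0) ((l.length : Nat) : Int)
      = (((min (max num 0) (l.length : Int)).toNat : Nat) : Int) := by omega
  rw [hbN]
  generalize hb : (min (max num 0) (l.length : Int)).toNat = b
  have hrB : PySem.List.pyRange 0 ((b : Nat) : Int) 1
      = (List.range b).map (fun (k : Nat) => (k : Int)) := by
    rw [PySem.List.pyRange_one]; simp
  rw [hrB, List.foldl_map]
  have hstep : (fun (res : List Int) (k : Nat) =>
      PySem.List.pySetD res ((k : Nat) : Int) (PySem.List.pyGetD res ((k : Nat) : Int) 0 + 2 * val))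
      = (fun (res : List Int) (k : Nat) => res.set k (res.getD k 0 + 2 * val)) := by
    funext res k
    rw [PySem.List.pySetD_natCast, PySem.List.pyGetD_natCast]
  rw [hstep]
  have hble : b ≤ (l.map (fun x => x - val)).length := by
    simp only [List.length_map]; omega
  rw [patch_loop (2 * val) b _ hble]
  -- identify the two split forms
  rw [← List.map_take, List.map_map, ← List.map_drop]
  have h1 : (l.take b).map ((fun x => x + 2 * val) ∘ (fun x => x - val))
      = (l.take b).map (fun x => x + val) := by
    apply List.map_congr_left; intro x _
    simp [Function.comp_apply]; ring
  rw [h1, List.nil_append]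
  -- compare with A's split at (max 0 num).toNat: clamping at the length changes nothing
  by_cases hle : (max 0 num).toNat ≤ l.length
  · have hbn : (max 0 num).toNat = b := by omega
    exact uredi_split l num val b (by omega)
  · have hbn : b = l.length := by omega
    rw [uredi_split l num val (max 0 num).toNat rfl, hbn, List.take_length,
        List.take_of_length_le (by omega), List.drop_length,
        List.drop_eq_nil_of_le (by omega)]
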